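-- pv_equiv track=rewrite | github.com/zgraper/phonemefix | main.py | collapse_repeats
-- ===== SOURCE A (Python) =====
-- def collapse_repeats(tokens):
--     """
--     Collapse immediate repeats of the same token (except '|'),
--     which helps with lengthened consonants/vowels in child speech.
--     """
--     if not tokens:
--         return tokens
--
--     out = [tokens[0]]
--     for t in tokens[1:]:
--         if t == out[-1] and t != "|":
--             continue
--         out.append(t)
--     return out
-- ===== SOURCE B (Python) =====
-- def collapse_repeats(tokens):
--     """
--     Collapse immediate repeats of the same token (except '|'),
--     run-based: scan maximal runs of equal tokens; keep a '|' run whole,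
--     otherwise emit one representative per run.
--     """
--     if not tokens:
--         return tokens
--
--     out = []
--     i = 0
--     n = len(tokens)
--     while i < n:
--         key = tokens[i]
--         j = i
--         while j < n and tokens[j] == key:
--             j += 1
--         if key == "|":
--             out.extend(tokens[i:j])
--         else:
--             out.append(key)
--         i = j
--     return out
-- ===== Notes on version B (the rewrite author's own statement) =====
-- stated objective: alternative
-- what changed: Replaced A's compare-each-token-with-the-last-appended-element loop by a groupby-style run scan: B finds each maximal run of consecutive equal tokens, keeps a '|' run whole and emits one representative for any other run.
import Mathlib
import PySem

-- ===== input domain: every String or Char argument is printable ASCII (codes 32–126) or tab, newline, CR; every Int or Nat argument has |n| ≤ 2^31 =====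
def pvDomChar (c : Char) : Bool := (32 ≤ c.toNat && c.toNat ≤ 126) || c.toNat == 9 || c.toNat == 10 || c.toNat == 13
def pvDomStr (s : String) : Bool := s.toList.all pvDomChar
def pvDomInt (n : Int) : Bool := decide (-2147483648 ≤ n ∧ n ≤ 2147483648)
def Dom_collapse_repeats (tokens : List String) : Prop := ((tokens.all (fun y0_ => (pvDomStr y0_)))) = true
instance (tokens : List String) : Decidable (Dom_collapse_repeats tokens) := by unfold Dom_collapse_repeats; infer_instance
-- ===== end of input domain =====

-- B replaces A's compare-with-last-appended loop by a run-based scan (groupby-style: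
-- maximal runs of equal tokens; a '|' run is kept whole, any other run contributes one
-- representative); objective: idiomatic/alternative, same cost.

-- ===== PORT A =====
-- the `for t in tokens[1:]` loop of A: out starts as [tokens[0]]
def pvALoop (out : List String) (ts : List String) : List String :=
  match ts with
  | [] => out
  | t :: rest =>
    if PySem.List.pyGet? out (-1) = some t ∧ t ≠ "|" then pvALoop out rest
    else pvALoop (out ++ [t]) rest

def collapse_repeats (tokens : List String) : List String :=
  match tokens with
  | [] => tokens
  | t :: rest => pvALoop [t] rest

-- ===== PORT B =====
-- the inner `while j < n and tokens[j] == key` scan of B: returns (the rest of the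
-- current run, the remaining tokens)
def pvTakeRun (key : String) (ts : List String) : List String × List String :=
  match ts with
  | [] => ([], [])
  | t :: rest =>
    if t = key then ((t :: (pvTakeRun key rest).1), (pvTakeRun key rest).2)
    else ([], t :: rest)

theorem pvTakeRun_len (key : String) (ts : List String) :
    (pvTakeRun key ts).2.length ≤ ts.length := by
  induction ts with
  | nil => simp [pvTakeRun]
  | cons t rest ih =>
    simp only [pvTakeRun]
    split
    · exact Nat.le_succ_of_le ih
    · simp

-- the outer `while i < n` loop of B: one run per iteration
def collapse_repeats_alt (tokens : List String) : List String :=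
  match tokens with
  | [] => tokens
  | t :: rest =>
    (if t = "|" then t :: (pvTakeRun t rest).1 else [t]) ++
      collapse_repeats_alt (pvTakeRun t rest).2
termination_by tokens.length
decreasing_by
  exact Nat.lt_succ_of_le (pvTakeRun_len t rest)

-- ===== PRECONDITION & SPEC =====
def Spec_collapse_repeats (tokens : List String) (out : List String) : Prop := out = collapse_repeats_alt tokens
instance (tokens : List String) (out : List String) : Decidable (Spec_collapse_repeats tokens out) := by unfold Spec_collapse_repeats; infer_instance

-- ===== CLAIM (what is proved, stated in full; the proofs are below) =====
def Claim_equal_collapse_repeats : Prop := ∀ (tokens : List String), Dom_collapse_repeats tokens → Spec_collapse_repeats tokens (collapse_repeats tokens)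

-- ===== LEMMAS AND PROOFS =====

-- common characterisation: the tail both programs append after the first token, given
-- that the last emitted token is k
def pvAltFrom (k : String) (ts : List String) : List String :=
  match ts with
  | [] => []
  | t :: rest => if t = k ∧ t ≠ "|" then pvAltFrom k rest else t :: pvAltFrom t rest

theorem pvALoop_eq (ts : List String) : ∀ (acc : List String) (k : String),
    pvALoop (acc ++ [k]) ts = acc ++ k :: pvAltFrom k ts := by
  induction ts with
  | nil => intro acc k; simp [pvALoop, pvAltFrom]
  | cons t rest ih =>
    intro acc k
    simp only [pvALoop, pvAltFrom, PySem.List.pyGet?_neg_one_append_singleton,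
      Option.some.injEq]
    by_cases h : k = t ∧ t ≠ "|"
    · have h' : t = k ∧ t ≠ "|" := ⟨h.1.symm, h.2⟩
      rw [if_pos h, if_pos h', ih acc k]
    · have h' : ¬ (t = k ∧ t ≠ "|") := fun hc => h ⟨hc.1.symm, hc.2⟩
      rw [if_neg h, if_neg h']
      have := ih (acc ++ [k]) t
      simpa using this

theorem pvAlt_eq : ∀ (n : ℕ) (ts : List String), ts.length ≤ n → ∀ (k : String),
    (if k = "|" then k :: (pvTakeRun k ts).1 else [k]) ++
      collapse_repeats_alt (pvTakeRun k ts).2 = k :: pvAltFrom k ts := by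
  intro n
  induction n with
  | zero =>
    intro ts h k
    have : ts = [] := List.eq_nil_of_length_eq_zero (Nat.le_zero.mp h)
    subst this
    by_cases hk : k = "|" <;> simp [pvTakeRun, pvAltFrom, collapse_repeats_alt, hk]
  | succ n ih =>
    intro ts h k
    match ts with
    | [] =>
      by_cases hk : k = "|" <;> simp [pvTakeRun, pvAltFrom, collapse_repeats_alt, hk]
    | t :: rest =>
      have hr : rest.length ≤ n := by simpa using Nat.lt_succ_iff.mp (Nat.lt_of_lt_of_le (by simp) h)
      by_cases ht : t = k
      · subst ht
        rw [show pvTakeRun t (t :: rest) = (t :: (pvTakeRun t rest).1, (pvTakeRun t rest).2)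
          from by simp [pvTakeRun]]
        by_cases hk : t = "|"
        · subst hk
          have hrec : (pvTakeRun "|" rest).1 ++ collapse_repeats_alt (pvTakeRun "|" rest).2 =
              pvAltFrom "|" rest := by
            have := ih rest hr "|"
            simpa using this
          simp [pvAltFrom, hrec]
        · have hrec := ih rest hr t
          rw [if_neg hk] at hrec
          simpa [pvAltFrom, hk] using hrec
      · have hrun : pvTakeRun k (t :: rest) = ([], t :: rest) := by
          simp [pvTakeRun, ht]
        rw [hrun]
        have hcond : ¬ (t = k ∧ t ≠ "|") := fun hc => ht hc.1
        simp only [pvAltFrom, if_neg hcond]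
        have halt : collapse_repeats_alt (t :: rest) = t :: pvAltFrom t rest := by
          rw [collapse_repeats_alt]
          exact ih rest hr t
        by_cases hk : k = "|" <;> simp [hk, halt]

-- ===== VERDICT (by name: the statement is the Claim_ definition above) =====
theorem collapse_repeats_spec : Claim_equal_collapse_repeats := by
  intro tokens _
  unfold Spec_collapse_repeats
  match tokens with
  | [] => simp [collapse_repeats, collapse_repeats_alt]
  | t :: rest =>
    show pvALoop [t] rest = _
    have hA := pvALoop_eq rest [] t
    simp only [List.nil_append] at hA
    rw [hA, collapse_repeats_alt]
    exact (pvAlt_eq rest.length rest le_rfl t).symm
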